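-- pv_equiv track=rewrite | github.com/andebetT/CODE-Lib | module4/sum.py | calculate_sums
-- ===== SOURCE A (Python) =====
-- def calculate_sums(list1):
--     result = []
--     next_larger = []
--
--     # Find the next larger integer for each element in the list
--     for i in range(len(list1)):
--         for j in range(i + 1, len(list1)):
--             if list1[j] > list1[i]:
--                 next_larger.append(list1[j])
--                 break
--         else:
--             next_larger.append(None)
--
--     # Calculate the sums and append to the result list
--     for i in range(len(list1)):
--         if next_larger[i] is not None:
--             result.append(list1[i] + next_larger[i])
--         else:
--             result.append(list1[i])
--
--     return result
-- ===== SOURCE B (Python) =====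
-- def calculate_sums(list1):
--     # Monotonic stack, right-to-left: O(n) next-greater-element
--     stack = []
--     result = []
--     for x in reversed(list1):
--         while stack and stack[-1] <= x:
--             stack.pop()
--         result.append(x + stack[-1] if stack else x)
--         stack.append(x)
--     result.reverse()
--     return result
-- ===== Notes on version B (the rewrite author's own statement) =====
-- stated objective: faster
-- what changed: Replaced the quadratic nested scan for each element's next strictly-greater element by a single right-to-left pass with a monotonic stack.
import Mathlib
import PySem

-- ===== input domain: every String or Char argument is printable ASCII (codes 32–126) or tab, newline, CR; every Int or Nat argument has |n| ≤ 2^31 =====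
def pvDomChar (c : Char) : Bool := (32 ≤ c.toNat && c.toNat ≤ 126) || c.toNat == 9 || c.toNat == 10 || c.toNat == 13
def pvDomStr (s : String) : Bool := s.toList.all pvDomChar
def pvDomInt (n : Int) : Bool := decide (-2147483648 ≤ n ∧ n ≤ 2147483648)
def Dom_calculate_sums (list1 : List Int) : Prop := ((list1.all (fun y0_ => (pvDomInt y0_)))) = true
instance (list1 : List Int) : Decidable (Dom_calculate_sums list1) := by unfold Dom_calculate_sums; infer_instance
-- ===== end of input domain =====

-- B replaces A's quadratic nested scan by a single right-to-left monotonic-stack pass (asymptotically faster).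


-- ===== PORT A =====
-- inner loop: scan list1[i+1:] for the first element strictly greater than x
def findGreater (x : Int) : List Int → Option Int
  | [] => none
  | y :: ys => if y > x then some y else findGreater x ys

-- first loop: next_larger[i] for every i (each element paired with a scan of its suffix)
def nextLargers : List Int → List (Option Int)
  | [] => []
  | x :: rest => findGreater x rest :: nextLargers rest

-- second loop: combine list1[i] with next_larger[i]
def calculate_sums (list1 : List Int) : List Int :=
  List.zipWith (fun x o => match o with | some v => x + v | none => x) list1 (nextLargers list1)

-- ===== PORT B =====
-- 'while stack and stack[-1] <= x: stack.pop()'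
def popLE (x : Int) : List Int → List Int
  | [] => []
  | y :: ys => if y ≤ x then popLE x ys else y :: ys

-- the reversed loop: processes the list from the right, returning (stack, result)
def altGo : List Int → List Int × List Int
  | [] => ([], [])
  | x :: rest =>
    let (st, res) := altGo rest
    let st' := popLE x st
    (x :: st', (match st'.head? with | some y => x + y | none => x) :: res)

def calculate_sums_alt (list1 : List Int) : List Int := (altGo list1).2

-- ===== PRECONDITION & SPEC =====
def Spec_calculate_sums (list1 : List Int) (out : List Int) : Prop := out = calculate_sums_alt list1
instance (list1 : List Int) (out : List Int) : Decidable (Spec_calculate_sums list1 out) := by unfold Spec_calculate_sums; infer_instance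

-- ===== CLAIM (what is proved, stated in full; the proofs are below) =====
def Claim_equal_calculate_sums : Prop := ∀ (list1 : List Int), Dom_calculate_sums list1 → Spec_calculate_sums list1 (calculate_sums list1)

-- ===== LEMMAS AND PROOFS =====

-- popping twice with y ≤ x is popping once with x
theorem popLE_popLE (x y : Int) (h : y ≤ x) : ∀ s : List Int, popLE x (popLE y s) = popLE x s := by
  intro s
  induction s with
  | nil => rfl
  | cons z zs ih =>
    simp only [popLE]
    by_cases hz : z ≤ y
    · rw [if_pos hz, ih, if_pos (le_trans hz h)]
    · rw [if_neg hz]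
      simp only [popLE]

-- the head of the popped stack is exactly the first strictly-greater element of the suffix
theorem head_popLE : ∀ (l : List Int) (x : Int), (popLE x (altGo l).1).head? = findGreater x l := by
  intro l
  induction l with
  | nil => intro x; rfl
  | cons y rest ih =>
    intro x
    simp only [altGo, findGreater]
    by_cases h : y > x
    · rw [if_pos h]
      simp only [popLE, if_neg (not_le.mpr h), List.head?]
    · rw [if_neg h]
      simp only [popLE, if_pos (not_lt.mp h)]
      rw [popLE_popLE x y (not_lt.mp h), ih]

theorem alt_eq_a : ∀ l : List Int, (altGo l).2 = calculate_sums l := by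
  intro l
  induction l with
  | nil => rfl
  | cons x rest ih =>
    simp only [altGo, calculate_sums, nextLargers, List.zipWith]
    rw [head_popLE rest x, ih]
    rfl

-- ===== VERDICT (by name: the statement is the Claim_ definition above) =====
theorem calculate_sums_spec : Claim_equal_calculate_sums := by
  intro l _
  unfold Spec_calculate_sums calculate_sums_alt
  exact (alt_eq_a l).symm
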